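-- pv_equiv track=rewrite | github.com/light-src/AlgoForTest | Programmers/190823[3차]방금그곡/tyl.py | change_shap
-- ===== SOURCE A (Python) =====
-- def change_shap(check):
--     notes = ''
--     for i in range(len(check)-1):
--         if check[i] == '#' : continue
--         if check[i+1] == '#' : notes += check[i].lower(); continue
--         notes += check[i]
--     if check[-1] != '#': notes += check[-1]
--     return notes
-- ===== SOURCE B (Python) =====
-- def change_shap(check):
--     notes = []
--     for c in check:
--         if c == '#':
--             if notes:
--                 notes[-1] = notes[-1].lower()
--         else:
--             notes.append(c)
--     return ''.join(notes)
-- ===== Notes on version B (the rewrite author's own statement) =====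
-- stated objective: idiomatic
-- what changed: Replaces the index-based lookahead loop (peeking at the next character for a sharp sign) plus separate last-character handling with a single lookback pass that appends notes to a list and lowercases the previously appended note when a sharp sign is read; building the result with a list and join instead of string concatenation and per-index subscripting gives a constant-factor speedup.
import Mathlib
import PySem

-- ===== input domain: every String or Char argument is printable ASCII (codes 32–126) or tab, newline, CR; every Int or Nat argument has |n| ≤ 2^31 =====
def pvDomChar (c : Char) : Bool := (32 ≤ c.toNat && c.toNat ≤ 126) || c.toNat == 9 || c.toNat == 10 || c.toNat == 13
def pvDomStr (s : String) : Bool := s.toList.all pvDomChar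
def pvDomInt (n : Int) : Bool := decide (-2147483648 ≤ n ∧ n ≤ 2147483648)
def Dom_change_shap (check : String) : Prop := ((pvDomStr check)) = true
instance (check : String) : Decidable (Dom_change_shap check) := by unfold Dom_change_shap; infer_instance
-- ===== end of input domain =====

-- B replaces A's index/lookahead loop with a single lookback pass (lowercase the previously
-- appended note when '#' is read); A raises IndexError on "" (check[-1]), excluded by Pre_.

-- ===== PORT A =====
-- body of A's for-loop: the three branches in A's order
def chStepA (notes : List Char) (c d : Char) : List Char :=
  if c = '#' then notes
  else if d = '#' then notes ++ [PySem.Chars.lowerChar c]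
  else notes ++ [c]

-- pyGetD with a default is exact here: the loop indices i, i+1 are always in range, and
-- check[-1] is in range under Pre_ (check nonempty).
def change_shap (check : String) : String :=
  let cs := check.toList
  let notes : List Char := (PySem.List.pyRange 0 ((cs.length : Int) - 1) 1).foldl
    (fun notes i => chStepA notes (PySem.List.pyGetD cs i ' ') (PySem.List.pyGetD cs (i + 1) ' ')) []
  String.ofList (if PySem.List.pyGetD cs (-1) ' ' ≠ '#' then notes ++ [PySem.List.pyGetD cs (-1) ' '] else notes)

-- ===== PORT B =====
-- body of B's for-loop: on '#', lowercase the last appended note (if any); else append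
def chStepB (notes : List Char) (c : Char) : List Char :=
  if c = '#' then
    match notes.getLast? with
    | none => notes
    | some l => notes.dropLast ++ [PySem.Chars.lowerChar l]
  else notes ++ [c]

def change_shap_alt (check : String) : String :=
  String.ofList (check.toList.foldl chStepB [])

-- ===== PRECONDITION & SPEC =====
-- Pre_ excludes only the empty string, on which A raises IndexError at check[-1].
def Pre_change_shap (check : String) : Prop := check ≠ ""
instance (check : String) : Decidable (Pre_change_shap check) := by unfold Pre_change_shap; infer_instance
def pvWitness_change_shap : String := "CC#BD"

def Spec_change_shap (check : String) (out : String) : Prop := out = change_shap_alt check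
instance (check : String) (out : String) : Decidable (Spec_change_shap check out) := by unfold Spec_change_shap; infer_instance

-- ===== CLAIM (what is proved, stated in full; the proofs are below) =====
def Claim_equal_change_shap : Prop := ∀ (check : String), Dom_change_shap check → Pre_change_shap check → Spec_change_shap check (change_shap check)

-- ===== LEMMAS AND PROOFS =====

-- common characterisation: keep the non-'#' characters, lowercased exactly when the
-- immediately following character is '#'
def chSpecF : List Char → List Char
  | [] => []
  | c :: rest =>
    (if c = '#' then []
     else if rest.head? = some '#' then [PySem.Chars.lowerChar c] else [c]) ++ chSpecF rest

lemma lower_idem (c : Char) : PySem.Chars.lowerChar (PySem.Chars.lowerChar c) = PySem.Chars.lowerChar c := by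
  unfold PySem.Chars.lowerChar PySem.Chars.isupper
  have e0 : c.val.toNat = c.toNat := rfl
  by_cases h : ('A' ≤ c ∧ c ≤ 'Z')
  case pos =>
    have ha : ('A').val.toNat = 65 := by decide
    have hz : ('Z').val.toNat = 90 := by decide
    have h1 : 65 ≤ c.toNat := by have := h.1; simp only [Char.le_def, UInt32.le_iff_toNat_le] at this; omega
    have h2 : c.toNat ≤ 90 := by have := h.2; simp only [Char.le_def, UInt32.le_iff_toNat_le] at this; omega
    have hv : (c.toNat + 32).isValidChar := Or.inl (by omega)
    have ht : (Char.ofNat (c.toNat + 32)).val.toNat = c.toNat + 32 := by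
      have := Char.toNat_ofNat (c.toNat + 32); rw [if_pos hv] at this; exact this
    simp only [h.1, h.2, decide_true, Bool.and_self, if_true]
    have hn : ¬ (Char.ofNat (c.toNat + 32) ≤ 'Z') := by
      simp only [Char.le_def, UInt32.le_iff_toNat_le]; omega
    simp [hn]
  case neg =>
    rcases Decidable.not_and_iff_not_or_not.mp h with h' | h' <;> simp [h']

-- A's index loop over range(len-1), read as a fold over adjacent pairs
lemma loopA_shift (cs : List Char) (c : Char) (b : Int) (hb : 0 ≤ b) (a : List Char) :
    (PySem.List.pyRange 1 (b + 1) 1).foldl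
      (fun acc i => chStepA acc (PySem.List.pyGetD (c :: cs) i ' ') (PySem.List.pyGetD (c :: cs) (i + 1) ' ')) a
    = (PySem.List.pyRange 0 b 1).foldl
      (fun acc i => chStepA acc (PySem.List.pyGetD cs i ' ') (PySem.List.pyGetD cs (i + 1) ' ')) a := by
  rw [PySem.List.pyRange_one 1 (b + 1), PySem.List.pyRange_one 0 b]
  have : (b + 1 - 1).toNat = (b - 0).toNat := by omega
  rw [this]
  rw [List.foldl_map, List.foldl_map]
  congr 1
  funext acc k
  have e1 : (1 : Int) + (k : Int) = ((k + 1 : Nat) : Int) := by push_cast; ring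
  have e2 : (1 : Int) + (k : Int) + 1 = ((k + 2 : Nat) : Int) := by push_cast; ring
  have e3 : (0 : Int) + (k : Int) = ((k : Nat) : Int) := by omega
  have e4 : (0 : Int) + (k : Int) + 1 = ((k + 1 : Nat) : Int) := by push_cast; ring
  rw [e2, e1, e4, e3, PySem.List.pyGetD_natCast, PySem.List.pyGetD_natCast,
      PySem.List.pyGetD_natCast, PySem.List.pyGetD_natCast]
  simp

lemma loopA_eq_zip (cs : List Char) (init : List Char) :
    (PySem.List.pyRange 0 ((cs.length : Int) - 1) 1).foldl
      (fun acc i => chStepA acc (PySem.List.pyGetD cs i ' ') (PySem.List.pyGetD cs (i + 1) ' ')) init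
    = (cs.zip cs.tail).foldl (fun a p => chStepA a p.1 p.2) init := by
  induction cs generalizing init with
  | nil => rw [PySem.List.pyRange_one_eq_nil (by simp)]; rfl
  | cons c cs' ih =>
    cases cs' with
    | nil => rw [PySem.List.pyRange_one_eq_nil (by simp)]; rfl
    | cons d rest =>
      have hlen : ((c :: d :: rest).length : Int) - 1 = ((d :: rest).length : Int) - 1 + 1 := by
        simp only [List.length_cons]; push_cast; ring
      rw [hlen, PySem.List.pyRange_one_cons (by simp only [List.length_cons]; omega)]
      simp only [List.foldl_cons, zero_add]
      have h0 : PySem.List.pyGetD (c :: d :: rest) 0 ' ' = c := PySem.List.pyGetD_zero_cons _ _ _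
      have h1 : PySem.List.pyGetD (c :: d :: rest) 1 ' ' = d := by
        have e : (1 : Int) = ((1 : Nat) : Int) := by norm_num
        rw [e, PySem.List.pyGetD_natCast]; rfl
      rw [h0, h1,
        loopA_shift (d :: rest) c (((d :: rest).length : Int) - 1)
          (by simp only [List.length_cons]; push_cast; omega), ih]
      simp only [List.tail_cons, List.zip_cons_cons, List.foldl_cons]

lemma zipA_spec (cs : List Char) (h : cs ≠ []) (init : List Char) :
    ((cs.zip cs.tail).foldl (fun a p => chStepA a p.1 p.2) init)
      ++ (if cs.getLast h ≠ '#' then [cs.getLast h] else [])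
    = init ++ chSpecF cs := by
  induction cs generalizing init with
  | nil => exact absurd rfl h
  | cons c cs' ih =>
    cases cs' with
    | nil =>
      by_cases hc : c = '#' <;> simp [chSpecF, hc]
    | cons d rest =>
      have hne : d :: rest ≠ [] := by simp
      have hl : (c :: d :: rest).getLast (by simp) = (d :: rest).getLast hne := by
        simp [List.getLast_cons]
      simp only [List.tail_cons] at ih ⊢
      simp only [List.zip_cons_cons, List.foldl_cons]
      rw [hl, ih hne]
      by_cases hc : c = '#' <;> by_cases hd : d = '#' <;>
        simp [chStepA, chSpecF, hc, hd, List.append_assoc]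

-- B's lookback pass
lemma lowLast_snoc (xs : List Char) (c : Char) :
    chStepB (xs ++ [c]) '#' = xs ++ [PySem.Chars.lowerChar c] := by
  simp [chStepB]

lemma stepB_hash_idem (xs : List Char) :
    chStepB (chStepB xs '#') '#' = chStepB xs '#' := by
  rcases List.eq_nil_or_concat xs with rfl | ⟨ys, l, rfl⟩
  · rfl
  · simp only [List.concat_eq_append]
    rw [lowLast_snoc, lowLast_snoc, lower_idem]

lemma foldB_spec (cs : List Char) (init : List Char) :
    cs.foldl chStepB init
    = (if cs.head? = some '#' then chStepB init '#' else init) ++ chSpecF cs := by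
  induction cs generalizing init with
  | nil => simp [chSpecF]
  | cons c rest ih =>
    simp only [List.foldl_cons]
    rw [ih]
    by_cases hc : c = '#'
    · subst hc
      cases hr : rest.head? with
      | none => simp [chSpecF]
      | some d =>
        by_cases hd : d = '#'
        · subst hd; simp [chSpecF, stepB_hash_idem]
        · simp [chSpecF, hd]
    · have hstep : chStepB init c = init ++ [c] := by simp [chStepB, hc]
      cases hr : rest.head? with
      | none => simp [chSpecF, hr, hc, hstep]
      | some d =>
        by_cases hd : d = '#'
        · subst hd
          simp [chSpecF, hr, hc, hstep, lowLast_snoc, List.append_assoc]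
        · simp [chSpecF, hr, hc, hd, hstep, List.append_assoc]

-- ===== VERDICT (by name: the statement is the Claim_ definition above) =====
theorem change_shap_spec : Claim_equal_change_shap := by
  intro check _ hpre
  unfold Spec_change_shap
  have h : check.toList ≠ [] := by
    intro hn
    exact hpre (by rwa [String.toList_eq_nil_iff] at hn)
  simp only [change_shap, change_shap_alt]
  rw [loopA_eq_zip, foldB_spec]
  rw [PySem.List.pyGetD_neg_one check.toList ' ' h]
  have hB : (if check.toList.head? = some '#' then chStepB [] '#' else ([] : List Char)) = [] := by
    split <;> rfl
  rw [hB]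
  have hz := zipA_spec check.toList h []
  simp only [List.nil_append] at hz ⊢
  rw [← hz]
  by_cases hl : check.toList.getLast h = '#' <;> simp [hl]
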